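-- pv_equiv track=rewrite | github.com/python-decoded/check_io | tasks/escher_tasks/task_12__buttons.py | buttons
-- ===== SOURCE A (Python) =====
-- def get_group(matrix: list[str], item: tuple[int, int]) -> set:
--
--     to_visit = {item}
--     visited = set()
--     deltas = [(1, 0), (0, 1), (-1, 0), (0, -1)]
--
--     while to_visit:
--         x, y = to_visit.pop()
--         visited.add((x, y))
--
--         for dx, dy in deltas:
--             if y + dy not in range(len(matrix)):
--                 continue
--             if x + dx not in range(len(matrix[0])):
--                 continue
--
--             if matrix[y + dy][x + dx] == "0":
--                 continue
--             if (x + dx, y + dy) in visited: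
--                 continue
--
--             to_visit.add((x + dx, y + dy))
--
--     return visited
--
-- def buttons(ceiling: str):
--
--     matrix = [line.strip()
--               for line in ceiling.splitlines()
--               if line.strip()]
--
--     groups = []
--     visited = set()
--
--     for y, row in enumerate(matrix):
--         for x, cell in enumerate(row):
--             if (x, y) in visited:
--                 continue
--             if cell == "0":
--                 continue
--
--             group: set = get_group(matrix, (x, y))
--             visited.update(group)
--             group_weight = sum(int(matrix[y][x])
--                                for x, y in group)
--             groups.append(group_weight)
--
--     return sorted(groups, reverse=True)
-- ===== SOURCE B (Python) =====
-- def buttons(ceiling: str):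
--     matrix = [line.strip()
--               for line in ceiling.splitlines()
--               if line.strip()]
--
--     # identity labelling of all non-zero cells, row-major
--     label = {}
--     for y, row in enumerate(matrix):
--         for x, cell in enumerate(row):
--             if cell != "0":
--                 label[(x, y)] = (x, y)
--
--     # merge labels across right/down neighbours (union by relabelling)
--     for (x, y) in list(label):
--         for nb in ((x + 1, y), (x, y + 1)):
--             if nb in label:
--                 a, b = label[(x, y)], label[nb]
--                 if a != b:
--                     for k, v in label.items():
--                         if v == a:
--                             label[k] = b
--
--     # accumulate weight per label, first-insertion order
--     weights = {}
--     for (x, y), root in label.items():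
--         weights[root] = weights.get(root, 0) + int(matrix[y][x])
--
--     return sorted(weights.values(), reverse=True)
-- ===== Notes on version B (the rewrite author's own statement) =====
-- stated objective: alternative
-- what changed: Replaces the per-component worklist BFS (set-based get_group flood fill restarted at each unvisited cell) by a two-pass label-merging scheme: one pass labels every non-zero cell with itself, one pass merges labels across right/down neighbours, then weights are accumulated per final label in a dict.
-- outside the precondition, e.g. on buttons('12\n345'): A returns [15, 10], B returns [15]
import Mathlib
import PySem

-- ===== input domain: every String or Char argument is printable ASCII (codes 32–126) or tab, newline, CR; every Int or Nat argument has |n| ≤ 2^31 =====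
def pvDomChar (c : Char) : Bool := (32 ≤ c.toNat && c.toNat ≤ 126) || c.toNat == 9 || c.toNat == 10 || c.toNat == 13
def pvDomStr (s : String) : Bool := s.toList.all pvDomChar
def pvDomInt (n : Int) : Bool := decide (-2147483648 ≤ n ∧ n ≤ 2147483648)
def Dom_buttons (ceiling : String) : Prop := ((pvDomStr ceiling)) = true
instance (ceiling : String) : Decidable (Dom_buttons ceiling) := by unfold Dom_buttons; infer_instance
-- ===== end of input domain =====

-- B replaces A's per-component worklist BFS by a two-pass union-by-relabelling scheme
-- (label every non-zero cell, merge labels across right/down neighbours, sum weights per label);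
-- objective: alternative. Equality of return values is proved on Pre_ (rectangular all-digit grids).

-- ===== PORT A =====
-- shared parsing helper: Python line `matrix = [line.strip() for line in ceiling.splitlines() if line.strip()]`
-- (identical in Source A and Source B); rows kept as List Char
def pvParse (ceiling : String) : List (List Char) :=
  ((PySem.Str.splitlines ceiling).map (fun l => PySem.Chars.strip l.toList)).filter
    (fun r => decide (r ≠ []))

-- shared: `int(matrix[y][x])` on a single char (Pre_ guarantees a digit, so ofChars? is some)
def pvDigit (c : Char) : Int := (PySem.Int.ofChars? [c]).getD 0

-- shared: `matrix[y][x]` (callers have checked the indices; default is never hit inside Pre_)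
def pvAt (m : List (List Char)) (x y : Int) : Char :=
   (PySem.List.pyGet? ((PySem.List.pyGet? m y).getD []) x).getD ' '

-- get_group's while-loop. Python pops an arbitrary element of the set `to_visit`; the port pops
-- the head. Inside Pre_ the returned set and every use of it are independent of the pop order.
-- fuel strictly bounds the number of iterations (each one adds a fresh cell to `visited`).
def getGroupLoop (m : List (List Char)) (fuel : Nat) (toVisit visited : PySem.Set (Int × Int)) :
    PySem.Set (Int × Int) :=
  match fuel with
  | 0 => visited
  | fuel + 1 =>
    match toVisit with
    | [] => visited
    | (x, y) :: rest =>
      let visited' := PySem.Set.add visited (x, y)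
      let toVisit' := [((1 : Int), (0 : Int)), (0, 1), (-1, 0), (0, -1)].foldl
        (fun tv d =>
          if ¬ (0 ≤ y + d.2 ∧ y + d.2 < (m.length : Int)) then tv
          else if ¬ (0 ≤ x + d.1 ∧ x + d.1 < ((((PySem.List.pyGet? m 0).getD []).length : Int))) then tv
          else if pvAt m (x + d.1) (y + d.2) = '0' then tv
          else if (x + d.1, y + d.2) ∈ visited' then tv
          else PySem.Set.add tv (x + d.1, y + d.2)) rest
      getGroupLoop m fuel toVisit' visited'

def pvFuel (m : List (List Char)) : Nat :=
  m.foldl (fun a r => a + r.length) 0 + m.length * ((PySem.List.pyGet? m 0).getD []).length + 1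

def getGroup (m : List (List Char)) (item : Int × Int) : PySem.Set (Int × Int) :=
  getGroupLoop m (pvFuel m) [item] PySem.Set.empty

def buttons (ceiling : String) : List Int :=
  let matrix := pvParse ceiling
  let st := (PySem.List.enumerate matrix 0).foldl
    (fun st yrow =>
      (PySem.List.enumerate yrow.2 0).foldl
        (fun st xcell =>
          if (xcell.1, yrow.1) ∈ st.2 then st
          else if xcell.2 = '0' then st
          else
            let group := getGroup matrix (xcell.1, yrow.1)
            -- `sum(int(matrix[y][x]) for x, y in group)`: a sum of ints, independent of set order
            let gw := (group.map (fun p => pvDigit (pvAt matrix p.1 p.2))).sum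
            (st.1 ++ [gw], PySem.Set.update st.2 group))
        st)
    (([] : List Int), (PySem.Set.empty : PySem.Set (Int × Int)))
  PySem.List.sorted st.1 (fun v => v) true

-- ===== PORT B =====
def buttons_alt (ceiling : String) : List Int :=
  let matrix := pvParse ceiling
  -- identity labelling of all non-zero cells, row-major
  let label0 : PySem.Dict (Int × Int) (Int × Int) := (PySem.List.enumerate matrix 0).foldl
    (fun d yrow =>
      (PySem.List.enumerate yrow.2 0).foldl
        (fun d xcell =>
          if xcell.2 = '0' then d
          else d.insert (xcell.1, yrow.1) (xcell.1, yrow.1)) d)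
    PySem.Dict.empty
  -- merge labels across right/down neighbours (union by relabelling); keys never change
  let label := label0.keys.foldl
    (fun d p =>
      [(p.1 + 1, p.2), (p.1, p.2 + 1)].foldl
        (fun d nb =>
          if d.contains nb then
            let a := d.getD p p
            let b := d.getD nb nb
            if a ≠ b then
              PySem.Dict.mk (d.items.map (fun kv => if kv.2 = a then (kv.1, b) else kv))
            else d
          else d) d)
    label0
  -- accumulate weight per label, first-insertion order
  let weights := label.items.foldl
    (fun w kv => w.insert kv.2 (w.getD kv.2 0 + pvDigit (pvAt matrix kv.1.1 kv.1.2)))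
    (PySem.Dict.empty : PySem.Dict (Int × Int) Int)
  PySem.List.sorted weights.values (fun v => v) true

-- ===== PRECONDITION & SPEC =====
-- Pre_ admits rectangular grids whose cells are all decimal digits.  Excluded: grids with a
-- non-digit cell (A raises ValueError there) and ragged grids (A often raises IndexError there,
-- and where it returns, its bounds check against the first row's length makes the grouping —
-- even double counting of cells — accidental; see the cite "12\n345").
def Pre_buttons (ceiling : String) : Prop :=
  ((pvParse ceiling).all (fun r => r.all Char.isDigit &&
    r.length == ((pvParse ceiling).headD []).length)) = true
instance (ceiling : String) : Decidable (Pre_buttons ceiling) := by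
  unfold Pre_buttons; infer_instance

def pvWitness_buttons : String := "120\n305"

def Spec_buttons (ceiling : String) (out : List Int) : Prop := out = buttons_alt ceiling
instance (ceiling : String) (out : List Int) : Decidable (Spec_buttons ceiling out) := by
  unfold Spec_buttons; infer_instance

-- ===== CLAIM (what is proved, stated in full; the proofs are below) =====
def Claim_equal_buttons : Prop :=
  ∀ (ceiling : String), Dom_buttons ceiling → Pre_buttons ceiling →
    Spec_buttons ceiling (buttons ceiling)

-- ===== LEMMAS AND PROOFS =====

-- ---------- generic helpers ----------

/-- Fold a step function over a list while maintaining an invariant indexed by the processed prefix. -/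
theorem pvFoldInv {α σ : Type} (f : σ → α → σ) (Inv : List α → σ → Prop) :
    ∀ (suff pref : List α) (d : σ),
      Inv pref d →
      (∀ C x d', x ∈ suff → Inv C d' → Inv (C ++ [x]) (f d' x)) →
      Inv (pref ++ suff) (suff.foldl f d) := by
  intro suff
  induction suff with
  | nil => intro pref d h _; simpa using h
  | cons x t ih =>
    intro pref d h hstep
    have h1 : Inv (pref ++ [x]) (f d x) := hstep pref x d (by simp) h
    have h2 := ih (pref ++ [x]) (f d x) h1 (fun C y d' hy hI => hstep C y d' (by simp [hy]) hI)
    simpa [List.append_assoc] using h2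

/-- Elements on which the step is the identity can be filtered out of a fold. -/
theorem pvFoldlSkip {α σ : Type} (p : α → Bool) (f : σ → α → σ) :
    ∀ (l : List α) (init : σ), (∀ s x, x ∈ l → p x = false → f s x = s) →
      l.foldl f init = (l.filter p).foldl f init := by
  intro l
  induction l with
  | nil => intro init _; rfl
  | cons x t ih =>
    intro init h
    by_cases hx : p x = true
    · simp only [List.filter_cons, hx, if_true, List.foldl_cons]
      exact ih (f init x) (fun s y hy => h s y (List.mem_cons_of_mem _ hy))
    · have hx' : p x = false := by simpa using hx
      simp only [List.filter_cons, hx', List.foldl_cons, h init x (by simp) hx']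
      exact ih init (fun s y hy => h s y (List.mem_cons_of_mem _ hy))

theorem pvEqvGen_empty_rel {α : Type} (r : α → α → Prop) (hr : ∀ a b, ¬ r a b) (u v : α)
    (h : Relation.EqvGen r u v) : u = v := by
  induction h with
  | rel a b hab => exact absurd hab (hr a b)
  | refl => rfl
  | symm a b _ ih => exact ih.symm
  | trans a b c _ _ ih1 ih2 => exact ih1.trans ih2

theorem pvEqvGen_to_reflTransGen {α : Type} {r : α → α → Prop} (hs : ∀ a b, r a b → r b a)
    {u v : α} (h : Relation.EqvGen r u v) : Relation.ReflTransGen r u v := by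
  induction h with
  | rel a b hab => exact Relation.ReflTransGen.single hab
  | refl => exact Relation.ReflTransGen.refl
  | symm a b _ ih => exact Relation.ReflTransGen.symmetric (fun x y hxy => hs x y hxy) ih
  | trans a b c _ _ ih1 ih2 => exact ih1.trans ih2

/-- Adding one pair (p, nb) to a relation: the generated equivalence grows in the standard way. -/
theorem pvEqvGen_snoc {α : Type} (r s : α → α → Prop) (p nb : α)
    (hs : ∀ a b, s a b ↔ r a b ∨ (a = p ∧ b = nb)) (u v : α) :
    Relation.EqvGen s u v ↔
      (Relation.EqvGen r u v ∨
       (Relation.EqvGen r u p ∧ Relation.EqvGen r nb v) ∨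
       (Relation.EqvGen r u nb ∧ Relation.EqvGen r p v)) := by
  constructor
  · intro h
    induction h with
    | rel a b hab =>
      rcases (hs a b).mp hab with h' | ⟨ha, hb⟩
      · exact Or.inl (Relation.EqvGen.rel _ _ h')
      · subst ha; subst hb
        exact Or.inr (Or.inl ⟨Relation.EqvGen.refl _, Relation.EqvGen.refl _⟩)
    | refl a => exact Or.inl (Relation.EqvGen.refl a)
    | symm a b _ ih =>
      rcases ih with h' | ⟨h1, h2⟩ | ⟨h1, h2⟩
      · exact Or.inl (Relation.EqvGen.symm _ _ h')
      · exact Or.inr (Or.inr ⟨Relation.EqvGen.symm _ _ h2, Relation.EqvGen.symm _ _ h1⟩)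
      · exact Or.inr (Or.inl ⟨Relation.EqvGen.symm _ _ h2, Relation.EqvGen.symm _ _ h1⟩)
    | trans a b c _ _ ih1 ih2 =>
      rcases ih1 with h1 | ⟨h1, h1'⟩ | ⟨h1, h1'⟩ <;>
        rcases ih2 with h2 | ⟨h2, h2'⟩ | ⟨h2, h2'⟩
      · exact Or.inl (Relation.EqvGen.trans _ _ _ h1 h2)
      · exact Or.inr (Or.inl ⟨Relation.EqvGen.trans _ _ _ h1 h2, h2'⟩)
      · exact Or.inr (Or.inr ⟨Relation.EqvGen.trans _ _ _ h1 h2, h2'⟩)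
      · exact Or.inr (Or.inl ⟨h1, Relation.EqvGen.trans _ _ _ h1' h2⟩)
      · exact Or.inr (Or.inl ⟨h1, h2'⟩)
      · exact Or.inl (Relation.EqvGen.trans _ _ _ h1 h2')
      · exact Or.inr (Or.inr ⟨h1, Relation.EqvGen.trans _ _ _ h1' h2⟩)
      · exact Or.inl (Relation.EqvGen.trans _ _ _ h1 h2')
      · exact Or.inr (Or.inr ⟨h1, h2'⟩)
  · intro h
    have hmono : ∀ x y, Relation.EqvGen r x y → Relation.EqvGen s x y :=
      fun x y hxy => Relation.EqvGen.mono (fun a b hab => (hs a b).mpr (Or.inl hab)) hxy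
    have hstep : Relation.EqvGen s p nb := Relation.EqvGen.rel _ _ ((hs p nb).mpr (Or.inr ⟨rfl, rfl⟩))
    rcases h with h' | ⟨h1, h2⟩ | ⟨h1, h2⟩
    · exact hmono _ _ h'
    · exact Relation.EqvGen.trans _ _ _ (hmono _ _ h1)
        (Relation.EqvGen.trans _ _ _ hstep (hmono _ _ h2))
    · exact Relation.EqvGen.trans _ _ _ (hmono _ _ h1)
        (Relation.EqvGen.trans _ _ _ (Relation.EqvGen.symm _ _ hstep) (hmono _ _ h2))

-- ---------- grid vocabulary ----------

def pvW (m : List (List Char)) : Nat := ((PySem.List.pyGet? m 0).getD []).length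

def pvRect (m : List (List Char)) : Prop := ∀ r ∈ m, r.length = pvW m

def pvIsCell (m : List (List Char)) (p : Int × Int) : Prop :=
  0 ≤ p.1 ∧ p.1 < (pvW m : Int) ∧ 0 ≤ p.2 ∧ p.2 < (m.length : Int) ∧ pvAt m p.1 p.2 ≠ '0'

def pvAdj (m : List (List Char)) (p q : Int × Int) : Prop :=
  pvIsCell m p ∧ pvIsCell m q ∧ (p.1 - q.1).natAbs + (p.2 - q.2).natAbs = 1

def pvReach (m : List (List Char)) : (Int × Int) → (Int × Int) → Prop :=
  Relation.ReflTransGen (pvAdj m)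

def posPairs (m : List (List Char)) : List ((Int × Int) × Char) :=
  (PySem.List.enumerate m 0).flatMap
    (fun yr => (PySem.List.enumerate yr.2 0).map (fun xc => ((xc.1, yr.1), xc.2)))

def cellList (m : List (List Char)) : List (Int × Int) :=
  ((posPairs m).filter (fun pc => pc.2 ≠ '0')).map (fun pc => pc.1)

def candList (m : List (List Char)) : List ((Int × Int) × (Int × Int)) :=
  (cellList m).flatMap (fun p => [(p, (p.1 + 1, p.2)), (p, (p.1, p.2 + 1))])

def pvF (d : PySem.Dict (Int × Int) (Int × Int)) (p : Int × Int) : Int × Int := d.getD p p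

def pvWtOf (m : List (List Char)) (p : Int × Int) : Int := pvDigit (pvAt m p.1 p.2)

def pvGw (m : List (List Char)) (p : Int × Int) : Int :=
  ((getGroup m p).map (fun q => pvWtOf m q)).sum

theorem pvF_get? (d : PySem.Dict (Int × Int) (Int × Int)) (x : Int × Int) :
    pvF d x = (d.get? x).getD x := by
  unfold pvF
  rw [PySem.Dict.getD_eq_get?_getD]

def pvERel (m : List (List Char)) (C : List ((Int × Int) × (Int × Int))) (u v : Int × Int) : Prop :=
  (u, v) ∈ C ∧ v ∈ cellList m

-- ---------- basic grid lemmas ----------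

theorem pvW_def (m : List (List Char)) : pvW m = (m.headD []).length := by
  cases m <;> simp [pvW, PySem.List.pyGet?, PySem.List.pyIdx?]

theorem pvAt_coe (m : List (List Char)) (x y : Nat) (hy : y < m.length)
    (hx : x < (m[y]).length) : pvAt m (x : Int) (y : Int) = m[y][x] := by
  unfold pvAt
  rw [PySem.List.pyGet?_natCast, PySem.List.pyGet?_natCast, List.getElem?_eq_getElem hy]
  simp only [Option.getD_some]
  rw [List.getElem?_eq_getElem hx]
  rfl

theorem mem_posPairs (m : List (List Char)) (pc : (Int × Int) × Char) :
    pc ∈ posPairs m ↔ ∃ (ynat : Nat) (hy : ynat < m.length) (xnat : Nat)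
      (hx : xnat < (m[ynat]).length), pc = (((xnat : Int), (ynat : Int)), m[ynat][xnat]) := by
  constructor
  · intro h
    rw [posPairs, List.mem_flatMap] at h
    obtain ⟨yr, hyr, h2⟩ := h
    rw [List.mem_map] at h2
    obtain ⟨xc, hxc, rfl⟩ := h2
    rw [PySem.List.mem_enumerate_iff] at hyr
    obtain ⟨ky, hky, rfl⟩ := hyr
    rw [PySem.List.mem_enumerate_iff] at hxc
    obtain ⟨kx, hkx, rfl⟩ := hxc
    exact ⟨ky, hky, kx, hkx, by simp⟩
  · rintro ⟨ynat, hy, xnat, hx, rfl⟩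
    rw [posPairs, List.mem_flatMap]
    refine ⟨(0 + (ynat : Int), m[ynat]), ?_, ?_⟩
    · rw [PySem.List.mem_enumerate_iff]; exact ⟨ynat, hy, rfl⟩
    · rw [List.mem_map]
      refine ⟨(0 + (xnat : Int), m[ynat][xnat]), ?_, by simp⟩
      rw [PySem.List.mem_enumerate_iff]; exact ⟨xnat, hx, rfl⟩

theorem mem_cellList (m : List (List Char)) (hrect : pvRect m) (p : Int × Int) :
    p ∈ cellList m ↔ pvIsCell m p := by
  constructor
  · intro h
    rw [cellList, List.mem_map] at h
    obtain ⟨pc, hpc, rfl⟩ := h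
    rw [List.mem_filter] at hpc
    obtain ⟨hpp, hnz⟩ := hpc
    rw [mem_posPairs] at hpp
    obtain ⟨ynat, hy, xnat, hx, rfl⟩ := hpp
    have hw : (m[ynat]).length = pvW m := hrect _ (List.getElem_mem hy)
    have hat : pvAt m (xnat : Int) (ynat : Int) = m[ynat][xnat] := pvAt_coe m xnat ynat hy hx
    unfold pvIsCell
    dsimp only
    refine ⟨by positivity, by exact_mod_cast hw ▸ hx, by positivity, by exact_mod_cast hy, ?_⟩
    rw [hat]
    simpa using hnz
  · intro h
    obtain ⟨h1, h2, h3, h4, h5⟩ := h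
    set xnat := p.1.toNat with hxdef
    set ynat := p.2.toNat with hydef
    have hx1 : (xnat : Int) = p.1 := Int.toNat_of_nonneg h1
    have hy1 : (ynat : Int) = p.2 := Int.toNat_of_nonneg h3
    have hy : ynat < m.length := by omega
    have hw : (m[ynat]).length = pvW m := hrect _ (List.getElem_mem hy)
    have hx : xnat < (m[ynat]).length := by omega
    have hat : pvAt m p.1 p.2 = m[ynat][xnat] := by
      rw [← hx1, ← hy1]; exact pvAt_coe m xnat ynat hy hx
    rw [cellList, List.mem_map]
    have hpp : (((xnat : Int), (ynat : Int)) : Int × Int) = p := by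
      rw [Prod.ext_iff]; exact ⟨hx1, hy1⟩
    refine ⟨(((xnat : Int), (ynat : Int)), m[ynat][xnat]), ?_, hpp⟩
    rw [List.mem_filter]
    refine ⟨(mem_posPairs m _).mpr ⟨ynat, hy, xnat, hx, rfl⟩, ?_⟩
    rw [← hat]
    simpa using h5

theorem nodup_cellList (m : List (List Char)) : (cellList m).Nodup := by
  have hall : ((posPairs m).map (fun pc => pc.1)).Nodup := by
    rw [posPairs, List.map_flatMap]
    rw [List.nodup_flatMap]
    constructor
    · intro yr _
      rw [List.map_map]
      have hpw := PySem.List.pairwise_lt_enumerate yr.2 0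
      exact List.pairwise_map.mpr (hpw.imp (fun {a b} hab => by
        intro hc
        have h' : a.1 = b.1 := by
          have := congrArg Prod.fst hc
          simpa using this
        omega))
    · have hpw := PySem.List.pairwise_lt_enumerate m 0
      refine hpw.imp ?_
      intro a b hab q hqa hqb
      simp only [List.map_map, List.mem_map] at hqa hqb
      obtain ⟨xa, _, ha⟩ := hqa
      obtain ⟨xb, _, hb⟩ := hqb
      have h1' : a.1 = q.2 := by simpa using congrArg Prod.snd ha
      have h2' : b.1 = q.2 := by simpa using congrArg Prod.snd hb
      omega
  have hsub : List.Sublist (cellList m) ((posPairs m).map (fun pc => pc.1)) := by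
    rw [cellList]
    exact List.Sublist.map _ List.filter_sublist
  exact hall.sublist hsub

theorem length_cellList_le (m : List (List Char)) :
    (cellList m).length ≤ m.foldl (fun a r => a + r.length) 0 := by
  have h1 : (cellList m).length ≤ (posPairs m).length := by
    rw [cellList, List.length_map]
    exact List.length_filter_le _ _
  have h2 : (posPairs m).length = (m.map List.length).sum := by
    rw [posPairs, List.length_flatMap]
    simp only [List.length_map, PySem.List.length_enumerate]
    rw [show (fun (yr : Int × List Char) => yr.2.length) =
      (List.length ∘ fun (yr : Int × List Char) => yr.2) from rfl]
    rw [← List.map_map, PySem.List.map_snd_enumerate]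
  have h3 : m.foldl (fun a r => a + r.length) 0 = 0 + (m.map List.length).sum :=
    PySem.List.foldl_add_nat m List.length 0
  omega

-- small Set helpers
theorem pvSet_add_not_mem {x : Int × Int} (s : PySem.Set (Int × Int)) (h : x ∉ s) :
    PySem.Set.add s x = s ++ [x] := by
  simp [PySem.Set.add, PySem.Set.contains, h]

theorem pvSet_add_mem {x : Int × Int} (s : PySem.Set (Int × Int)) (h : x ∈ s) :
    PySem.Set.add s x = s := by
  simp [PySem.Set.add, PySem.Set.contains, h]

theorem pvSet_nodup_update (l : List (Int × Int)) :
    ∀ (s : PySem.Set (Int × Int)), s.Nodup → (PySem.Set.update s l).Nodup := by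
  induction l with
  | nil => intro s h; simpa [PySem.Set.update] using h
  | cons x t ih =>
    intro s h
    have h1 : (PySem.Set.add s x).Nodup := PySem.Set.nodup_add s x h
    have := ih (PySem.Set.add s x) h1
    simpa [PySem.Set.update] using this

theorem pvGetD_irrel {κ ν : Type} [BEq κ] [LawfulBEq κ] (d : PySem.Dict κ ν) (k : κ)
    (hk : k ∈ d.keys) (d1 d2 : ν) : d.getD k d1 = d.getD k d2 := by
  have hc : d.contains k = true := (PySem.Dict.contains_iff_mem_keys d k).mpr hk
  rw [PySem.Dict.contains_eq_isSome_get?] at hc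
  obtain ⟨v, hv⟩ := Option.isSome_iff_exists.mp hc
  simp [PySem.Dict.getD_eq_get?_getD, hv]

theorem mem_candList (m : List (List Char)) (e : (Int × Int) × (Int × Int)) :
    e ∈ candList m ↔ e.1 ∈ cellList m ∧
      (e.2 = (e.1.1 + 1, e.1.2) ∨ e.2 = (e.1.1, e.1.2 + 1)) := by
  rw [candList, List.mem_flatMap]
  constructor
  · rintro ⟨p, hp, hmem⟩
    simp only [List.mem_cons, List.not_mem_nil, or_false] at hmem
    rcases hmem with h | h
    · subst h; exact ⟨hp, Or.inl rfl⟩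
    · subst h; exact ⟨hp, Or.inr rfl⟩
  · rintro ⟨h1, h2 | h2⟩
    · exact ⟨e.1, h1, by rw [show e = (e.1, e.2) from rfl, h2]; simp⟩
    · exact ⟨e.1, h1, by rw [show e = (e.1, e.2) from rfl, h2]; simp⟩

theorem pvAdj_symm (m : List (List Char)) (p q : Int × Int) (h : pvAdj m p q) : pvAdj m q p := by
  obtain ⟨h1, h2, h3⟩ := h
  exact ⟨h2, h1, by omega⟩

theorem pvReach_cell (m : List (List Char)) (p q : Int × Int) (hp : pvIsCell m p)
    (h : pvReach m p q) : pvIsCell m q := by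
  induction h with
  | refl => exact hp
  | tail _ hadj _ => exact hadj.2.1

theorem pvAdj_dest (m : List (List Char)) (b c : Int × Int) (h : pvAdj m b c) :
    c = (b.1 + 1, b.2) ∨ c = (b.1 - 1, b.2) ∨ c = (b.1, b.2 + 1) ∨ c = (b.1, b.2 - 1) := by
  obtain ⟨_, _, hd⟩ := h
  rcases b with ⟨b1, b2⟩; rcases c with ⟨c1, c2⟩
  simp only [Prod.mk.injEq]
  simp only at hd
  omega

-- ---------- BFS (port A's get_group) ----------

def pvBfsStep (m : List (List Char)) (x y : Int) (vis' : PySem.Set (Int × Int))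
    (tv : PySem.Set (Int × Int)) (d : Int × Int) : PySem.Set (Int × Int) :=
  if ¬ (0 ≤ y + d.2 ∧ y + d.2 < (m.length : Int)) then tv
  else if ¬ (0 ≤ x + d.1 ∧ x + d.1 < ((((PySem.List.pyGet? m 0).getD []).length : Int))) then tv
  else if pvAt m (x + d.1) (y + d.2) = '0' then tv
  else if (x + d.1, y + d.2) ∈ vis' then tv
  else PySem.Set.add tv (x + d.1, y + d.2)

theorem pvStepFold (m : List (List Char)) (x y : Int) (vis' : PySem.Set (Int × Int)) :
    ∀ (D : List (Int × Int)) (t : List (Int × Int)), t.Nodup →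
      ((D.foldl (pvBfsStep m x y vis') t).Nodup ∧
       (∀ q, q ∈ D.foldl (pvBfsStep m x y vis') t ↔
          q ∈ t ∨ ∃ d ∈ D, q = (x + d.1, y + d.2) ∧ pvIsCell m q ∧ q ∉ vis')) := by
  intro D
  induction D with
  | nil => intro t ht; exact ⟨ht, by simp⟩
  | cons d0 D ih =>
    intro t ht
    simp only [List.foldl_cons]
    have hstepT : ∀ tv : PySem.Set (Int × Int),
        pvIsCell m (x + d0.1, y + d0.2) ∧ (x + d0.1, y + d0.2) ∉ vis' →
        pvBfsStep m x y vis' tv d0 = PySem.Set.add tv (x + d0.1, y + d0.2) := by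
      intro tv hP
      obtain ⟨⟨ha1, ha2, ha3, ha4, ha5⟩, hnv⟩ := hP
      unfold pvBfsStep
      rw [if_neg (not_not_intro ⟨ha3, ha4⟩),
        if_neg (not_not_intro ⟨ha1, by unfold pvW at ha2; exact ha2⟩),
        if_neg ha5, if_neg hnv]
    have hstepF : ∀ tv : PySem.Set (Int × Int),
        ¬ (pvIsCell m (x + d0.1, y + d0.2) ∧ (x + d0.1, y + d0.2) ∉ vis') →
        pvBfsStep m x y vis' tv d0 = tv := by
      intro tv hP
      by_cases c1 : (0 ≤ y + d0.2 ∧ y + d0.2 < (m.length : Int)) <;>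
        by_cases c2 : (0 ≤ x + d0.1 ∧ x + d0.1 <
          ((((PySem.List.pyGet? m 0).getD []).length : Int))) <;>
        by_cases c3 : pvAt m (x + d0.1) (y + d0.2) = '0' <;>
        by_cases c4 : (x + d0.1, y + d0.2) ∈ vis' <;>
        simp [pvBfsStep, c1, c2, c3, c4] <;>
        exact absurd ⟨⟨c2.1, c2.2, c1.1, c1.2, c3⟩, c4⟩ hP
    by_cases hP : pvIsCell m (x + d0.1, y + d0.2) ∧ (x + d0.1, y + d0.2) ∉ vis'
    · rw [hstepT t hP]
      by_cases hmemt : (x + d0.1, y + d0.2) ∈ t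
      · rw [pvSet_add_mem t hmemt]
        obtain ⟨hnd, hmem⟩ := ih t ht
        refine ⟨hnd, fun q => ?_⟩
        rw [hmem q]
        constructor
        · rintro (h | ⟨d, hd, rest⟩)
          · exact Or.inl h
          · exact Or.inr ⟨d, List.mem_cons_of_mem _ hd, rest⟩
        · rintro (h | ⟨d, hd, rest⟩)
          · exact Or.inl h
          · rcases List.mem_cons.mp hd with rfl | hd'
            · exact Or.inl (rest.1 ▸ hmemt)
            · exact Or.inr ⟨d, hd', rest⟩
      · rw [pvSet_add_not_mem t hmemt]
        have hnd' : (t ++ [(x + d0.1, y + d0.2)]).Nodup :=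
          List.Nodup.append ht (List.nodup_singleton _)
            (fun q hq hq' => hmemt ((List.mem_singleton.mp hq') ▸ hq))
        obtain ⟨hnd, hmem⟩ := ih (t ++ [(x + d0.1, y + d0.2)]) hnd'
        refine ⟨hnd, fun q => ?_⟩
        rw [hmem q]
        simp only [List.mem_append, List.mem_singleton]
        constructor
        · rintro ((h | h) | ⟨d, hd, rest⟩)
          · exact Or.inl h
          · exact Or.inr ⟨d0, List.mem_cons_self, h, h ▸ hP.1, h ▸ hP.2⟩
          · exact Or.inr ⟨d, List.mem_cons_of_mem _ hd, rest⟩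
        · rintro (h | ⟨d, hd, rest⟩)
          · exact Or.inl (Or.inl h)
          · rcases List.mem_cons.mp hd with rfl | hd'
            · exact Or.inl (Or.inr rest.1)
            · exact Or.inr ⟨d, hd', rest⟩
    · rw [hstepF t hP]
      obtain ⟨hnd, hmem⟩ := ih t ht
      refine ⟨hnd, fun q => ?_⟩
      rw [hmem q]
      constructor
      · rintro (h | ⟨d, hd, rest⟩)
        · exact Or.inl h
        · exact Or.inr ⟨d, List.mem_cons_of_mem _ hd, rest⟩
      · rintro (h | ⟨d, hd, rest⟩)
        · exact Or.inl h
        · rcases List.mem_cons.mp hd with rfl | hd'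
          · exact absurd ⟨rest.1 ▸ rest.2.1, rest.1 ▸ rest.2.2⟩ hP
          · exact Or.inr ⟨d, hd', rest⟩

theorem getGroupLoop_spec (m : List (List Char)) (hrect : pvRect m) (s : Int × Int) :
    ∀ (fuel : Nat) (tv vis : List (Int × Int)),
      vis.Nodup → tv.Nodup → (∀ q ∈ tv, q ∉ vis) →
      (∀ q ∈ vis, pvIsCell m q ∧ pvReach m s q) →
      (∀ q ∈ tv, pvIsCell m q ∧ pvReach m s q) →
      (∀ q ∈ vis, ∀ q', pvAdj m q q' → q' ∈ vis ∨ q' ∈ tv) →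
      (s ∈ vis ∨ s ∈ tv) →
      (cellList m).length + 1 ≤ fuel + vis.length →
      ((getGroupLoop m fuel tv vis).Nodup ∧
        ∀ q, q ∈ getGroupLoop m fuel tv vis ↔ pvReach m s q) := by
  intro fuel
  induction fuel with
  | zero =>
    intro tv vis hndv _ _ hvisP _ _ _ hbound
    exfalso
    have hsubK : vis ⊆ cellList m := fun q hq =>
      (mem_cellList m hrect q).mpr (hvisP q hq).1
    have hsp := (List.Nodup.subperm hndv hsubK).length_le
    omega
  | succ fuel ih =>
    intro tv vis hndv hndt hdisj hvisP htvP hclose hs hbound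
    match tv, hndt, hdisj, htvP, hs with
    | [], _, _, _, hs =>
      rw [show getGroupLoop m (fuel + 1) [] vis = vis from rfl]
      refine ⟨hndv, fun q => ⟨fun hq => (hvisP q hq).2, fun hr => ?_⟩⟩
      induction hr with
      | refl =>
        rcases hs with h | h
        · exact h
        · simp at h
      | tail _ hadj ihh =>
        rcases hclose _ ihh _ hadj with h | h
        · exact h
        · simp at h
    | (px, py) :: rest, hndt, hdisj, htvP, hs =>
      rw [show getGroupLoop m (fuel + 1) ((px, py) :: rest) vis =
            getGroupLoop m fuel
              ([((1 : Int), (0 : Int)), (0, 1), (-1, 0), (0, -1)].foldl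
                (pvBfsStep m px py (PySem.Set.add vis (px, py))) rest)
              (PySem.Set.add vis (px, py)) from rfl]
      have hpvis : (px, py) ∉ vis := hdisj _ (List.mem_cons_self)
      have hveq : PySem.Set.add vis (px, py) = vis ++ [(px, py)] :=
        pvSet_add_not_mem vis hpvis
      rw [hveq]
      obtain ⟨hcell, hreach⟩ := htvP _ (List.mem_cons_self)
      have hrestnd : rest.Nodup := (List.nodup_cons.mp hndt).2
      have hpnotrest : (px, py) ∉ rest := (List.nodup_cons.mp hndt).1
      obtain ⟨htv'nd, htv'mem⟩ := pvStepFold m px py (vis ++ [(px, py)])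
        [((1 : Int), (0 : Int)), (0, 1), (-1, 0), (0, -1)] rest hrestnd
      apply ih
      · -- vis' nodup
        exact List.Nodup.append hndv (List.nodup_singleton _)
          (fun q hq hq' => hpvis ((List.mem_singleton.mp hq') ▸ hq))
      · exact htv'nd
      · -- disjoint
        intro q hq
        rcases (htv'mem q).mp hq with hq' | ⟨d, hd, hqe, hqc, hqv⟩
        · intro hv'
          rcases List.mem_append.mp hv' with h | h
          · exact hdisj q (List.mem_cons_of_mem _ hq') h
          · rw [List.mem_singleton] at h
            exact hpnotrest (h ▸ hq')
        · exact hqv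
      · -- visP
        intro q hq
        rcases List.mem_append.mp hq with h | h
        · exact hvisP q h
        · rw [List.mem_singleton] at h
          subst h
          exact ⟨hcell, hreach⟩
      · -- tvP
        intro q hq
        rcases (htv'mem q).mp hq with hq' | ⟨d, hd, hqe, hqc, _⟩
        · exact htvP q (List.mem_cons_of_mem _ hq')
        · refine ⟨hqc, hreach.tail ⟨hcell, hqc, ?_⟩⟩
          subst hqe
          simp only [List.mem_cons, List.not_mem_nil, or_false] at hd
          rcases hd with rfl | rfl | rfl | rfl <;> simp
      · -- closure
        intro q hq q' hadj
        rcases List.mem_append.mp hq with hqv | hqp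
        · rcases hclose q hqv q' hadj with h | h
          · exact Or.inl (List.mem_append_left _ h)
          · rcases List.mem_cons.mp h with rfl | h'
            · exact Or.inl (List.mem_append_right _ (List.mem_singleton.mpr rfl))
            · exact Or.inr ((htv'mem q').mpr (Or.inl h'))
        · rw [List.mem_singleton] at hqp
          subst hqp
          by_cases hv : q' ∈ vis ++ [(px, py)]
          · exact Or.inl hv
          · refine Or.inr ((htv'mem q').mpr (Or.inr ?_))
            rcases pvAdj_dest m _ _ hadj with h | h | h | h
            · exact ⟨(1, 0), by simp, by rw [h]; simp, hadj.2.1, hv⟩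
            · exact ⟨(-1, 0), by simp, by rw [h]; simp [sub_eq_add_neg], hadj.2.1, hv⟩
            · exact ⟨(0, 1), by simp, by rw [h]; simp, hadj.2.1, hv⟩
            · exact ⟨(0, -1), by simp, by rw [h]; simp [sub_eq_add_neg], hadj.2.1, hv⟩
      · -- s mem
        rcases hs with h | h
        · exact Or.inl (List.mem_append_left _ h)
        · rcases List.mem_cons.mp h with rfl | h'
          · exact Or.inl (List.mem_append_right _ (List.mem_singleton.mpr rfl))
          · exact Or.inr ((htv'mem s).mpr (Or.inl h'))
      · -- bound
        simp only [List.length_append, List.length_singleton]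
        omega

theorem getGroup_spec (m : List (List Char)) (hrect : pvRect m) (s : Int × Int)
    (hs : pvIsCell m s) :
    (getGroup m s).Nodup ∧ ∀ q, q ∈ getGroup m s ↔ pvReach m s q := by
  unfold getGroup
  apply getGroupLoop_spec m hrect s (pvFuel m) [s] []
  · exact List.nodup_nil
  · exact List.nodup_singleton s
  · simp
  · simp
  · intro q hq
    rw [List.mem_singleton] at hq
    subst hq
    exact ⟨hs, Relation.ReflTransGen.refl⟩
  · simp
  · simp
  · have := length_cellList_le m
    rw [pvFuel]
    omega

-- ---------- B: the label dictionary ----------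

theorem pvGet?_mk_relabel (a b : Int × Int) :
    ∀ (l : List ((Int × Int) × (Int × Int))) (x : Int × Int),
      (PySem.Dict.mk (l.map (fun kv => if kv.2 = a then (kv.1, b) else kv))).get? x =
        ((PySem.Dict.mk l).get? x).map (fun v => if v = a then b else v) := by
  intro l
  induction l with
  | nil => intro x; simp [PySem.Dict.get?]
  | cons kv rest ih =>
    intro x
    rcases kv with ⟨k0, v0⟩
    by_cases hkv : v0 = a
    · subst hkv
      simp only [List.map_cons]
      by_cases hk : k0 = x
      · subst hk; simp [PySem.Dict.get?_mk_cons]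
      · simp [PySem.Dict.get?_mk_cons, hk, ih x]
    · simp only [List.map_cons]
      by_cases hk : k0 = x
      · subst hk; simp [PySem.Dict.get?_mk_cons, hkv]
      · simp [PySem.Dict.get?_mk_cons, hk, hkv, ih x]

def pvLabel0 (m : List (List Char)) : PySem.Dict (Int × Int) (Int × Int) :=
  (PySem.List.enumerate m 0).foldl
    (fun d yrow =>
      (PySem.List.enumerate yrow.2 0).foldl
        (fun d xcell =>
          if xcell.2 = '0' then d
          else d.insert (xcell.1, yrow.1) (xcell.1, yrow.1)) d)
    PySem.Dict.empty

def pvMStep (d : PySem.Dict (Int × Int) (Int × Int)) (e : (Int × Int) × (Int × Int)) :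
    PySem.Dict (Int × Int) (Int × Int) :=
  if d.contains e.2 then
    let a := d.getD e.1 e.1
    let b := d.getD e.2 e.2
    if a ≠ b then
      PySem.Dict.mk (d.items.map (fun kv => if kv.2 = a then (kv.1, b) else kv))
    else d
  else d

def pvLabel (m : List (List Char)) : PySem.Dict (Int × Int) (Int × Int) :=
  (candList m).foldl pvMStep (pvLabel0 m)

theorem pvLabel0_items (m : List (List Char)) :
    (pvLabel0 m).items = (cellList m).map (fun p => (p, p)) := by
  have h1 : pvLabel0 m = (posPairs m).foldl
      (fun d pc => if pc.2 = '0' then d else d.insert pc.1 pc.1) PySem.Dict.empty := by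
    unfold pvLabel0
    rw [posPairs, List.foldl_flatMap]
    simp only [List.foldl_map]
  have h2 : pvLabel0 m = ((posPairs m).filter (fun pc => pc.2 ≠ '0')).foldl
      (fun d pc => if pc.2 = '0' then d else d.insert pc.1 pc.1) PySem.Dict.empty := by
    rw [h1]
    apply pvFoldlSkip
    intro s pc _ hpc
    have hz : pc.2 = '0' := by simpa using hpc
    simp [hz]
  have h3 : pvLabel0 m = (cellList m).foldl
      (fun d p => d.insert p p) PySem.Dict.empty := by
    rw [h2, cellList, List.foldl_map]
    apply PySem.List.foldl_congr_mem
    intro acc pc hpc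
    have hnz : pc.2 ≠ '0' := by
      have := List.mem_filter.mp hpc
      simpa using this.2
    simp [hnz]
  rw [h3]
  rw [PySem.Dict.items_foldl_insert_fresh (cellList m) (fun p => p) (fun p => p)
    PySem.Dict.empty (fun a _ => PySem.Dict.contains_empty a)
    (by simpa using nodup_cellList m)]
  simp [show (PySem.Dict.empty : PySem.Dict (Int × Int) (Int × Int)).items = [] from rfl]

theorem pvLabel0_keys (m : List (List Char)) : (pvLabel0 m).keys = cellList m := by
  simp only [PySem.Dict.keys, pvLabel0_items, List.map_map]
  rw [show ((fun (x : (Int × Int) × (Int × Int)) => x.1) ∘ fun (p : Int × Int) => (p, p)) = id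
    from rfl, List.map_id]

def pvInvM (m : List (List Char)) (C : List ((Int × Int) × (Int × Int)))
    (d : PySem.Dict (Int × Int) (Int × Int)) : Prop :=
  d.keys = cellList m ∧ (∀ p ∈ cellList m, pvF d p ∈ cellList m) ∧
  (∀ p q, p ∈ cellList m → q ∈ cellList m →
    (pvF d p = pvF d q ↔ Relation.EqvGen (pvERel m C) p q))

theorem pvLabel_good (m : List (List Char)) :
    pvInvM m (candList m) (pvLabel m) := by
  have h0 : pvInvM m [] (pvLabel0 m) := by
    have hkeys := pvLabel0_keys m
    have hnd : (pvLabel0 m).keys.Nodup := by rw [hkeys]; exact nodup_cellList m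
    have hF0 : ∀ p ∈ cellList m, pvF (pvLabel0 m) p = p := by
      intro p hp
      have hmem : (p, p) ∈ (pvLabel0 m).items := by
        rw [pvLabel0_items]; exact List.mem_map.mpr ⟨p, hp, rfl⟩
      exact PySem.Dict.getD_of_mem_items _ hmem hnd p
    refine ⟨hkeys, ?_, ?_⟩
    · intro p hp; rw [hF0 p hp]; exact hp
    · intro p q hp hq
      rw [hF0 p hp, hF0 q hq]
      constructor
      · intro h; subst h; exact Relation.EqvGen.refl p
      · intro h; exact pvEqvGen_empty_rel _ (by simp [pvERel]) p q h
  have hstep : ∀ C e d', e ∈ candList m → pvInvM m C d' →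
      pvInvM m (C ++ [e]) (pvMStep d' e) := by
    intro C e d' he hinv
    obtain ⟨hkeys, hFK, hiff⟩ := hinv
    obtain ⟨heK, _⟩ := (mem_candList m e).mp he
    by_cases hc : d'.contains e.2 = true
    · -- neighbour is a key
      have hnbK : e.2 ∈ cellList m := by
        rw [← hkeys]; exact (PySem.Dict.contains_iff_mem_keys d' e.2).mp hc
      have hsrel : ∀ u v, pvERel m (C ++ [e]) u v ↔
          pvERel m C u v ∨ (u = e.1 ∧ v = e.2) := by
        intro u v; unfold pvERel; rw [List.mem_append]
        constructor
        · rintro ⟨h | h, hvK⟩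
          · exact Or.inl ⟨h, hvK⟩
          · rw [List.mem_singleton] at h
            exact Or.inr ⟨congrArg Prod.fst h, congrArg Prod.snd h⟩
        · rintro (⟨h, hvK⟩ | ⟨h1, h2⟩)
          · exact ⟨Or.inl h, hvK⟩
          · refine ⟨Or.inr ?_, h2 ▸ hnbK⟩
            rw [List.mem_singleton, Prod.ext_iff]; exact ⟨h1, h2⟩
      have hsnoc := fun u v =>
        pvEqvGen_snoc (pvERel m C) (pvERel m (C ++ [e])) e.1 e.2 hsrel u v
      by_cases hab : pvF d' e.1 = pvF d' e.2
      · -- already same label: dictionary unchanged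
        have hred : pvMStep d' e = d' := by
          unfold pvMStep
          rw [if_pos hc]
          dsimp only
          rw [if_neg (by exact fun hne => hne hab)]
        rw [hred]
        have hpnb : Relation.EqvGen (pvERel m C) e.1 e.2 :=
          (hiff e.1 e.2 heK hnbK).mp hab
        refine ⟨hkeys, hFK, ?_⟩
        intro p q hp hq
        rw [hiff p q hp hq, hsnoc p q]
        constructor
        · exact Or.inl
        · rintro (h | ⟨h1, h2⟩ | ⟨h1, h2⟩)
          · exact h
          · exact Relation.EqvGen.trans _ _ _ h1 (Relation.EqvGen.trans _ _ _ hpnb h2)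
          · exact Relation.EqvGen.trans _ _ _ h1
              (Relation.EqvGen.trans _ _ _ (Relation.EqvGen.symm _ _ hpnb) h2)
      · -- merge: relabel the class of e.1's label to e.2's label
        have hred : pvMStep d' e = PySem.Dict.mk (d'.items.map
            (fun kv => if kv.2 = pvF d' e.1 then (kv.1, pvF d' e.2) else kv)) := by
          unfold pvMStep
          rw [if_pos hc]
          dsimp only
          rw [if_pos (by exact hab)]
          rfl
        rw [hred]
        have hget : ∀ x, (PySem.Dict.mk (d'.items.map
            (fun kv => if kv.2 = pvF d' e.1 then (kv.1, pvF d' e.2) else kv))).get? x =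
            (d'.get? x).map (fun v => if v = pvF d' e.1 then pvF d' e.2 else v) := by
          intro x
          exact pvGet?_mk_relabel (pvF d' e.1) (pvF d' e.2) d'.items x
        have hkeys'' : (PySem.Dict.mk (d'.items.map
            (fun kv => if kv.2 = pvF d' e.1 then (kv.1, pvF d' e.2) else kv))).keys =
            cellList m := by
          rw [← hkeys]
          simp only [PySem.Dict.keys]
          rw [List.map_map]
          apply List.map_congr_left
          intro kv _
          by_cases hkv : kv.2 = pvF d' e.1 <;> simp [hkv]
        have hsome : ∀ x ∈ cellList m, ∃ v, d'.get? x = some v ∧ pvF d' x = v := by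
          intro x hx
          have hcx : d'.contains x = true :=
            (PySem.Dict.contains_iff_mem_keys d' x).mpr (hkeys ▸ hx)
          rw [PySem.Dict.contains_eq_isSome_get?] at hcx
          obtain ⟨v, hv⟩ := Option.isSome_iff_exists.mp hcx
          exact ⟨v, hv, by rw [pvF_get?, hv]; rfl⟩
        have hF'' : ∀ x ∈ cellList m, pvF (PySem.Dict.mk (d'.items.map
            (fun kv => if kv.2 = pvF d' e.1 then (kv.1, pvF d' e.2) else kv))) x =
            if pvF d' x = pvF d' e.1 then pvF d' e.2 else pvF d' x := by
          intro x hx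
          obtain ⟨v, hv, hFv⟩ := hsome x hx
          rw [pvF_get?, hget x, hv, ← hFv]
          simp
        refine ⟨hkeys'', ?_, ?_⟩
        · intro p hp
          rw [hF'' p hp]
          split
          · exact hFK e.2 hnbK
          · exact hFK p hp
        · intro p q hp hq
          rw [hF'' p hp, hF'' q hq, hsnoc p q]
          have h1 : Relation.EqvGen (pvERel m C) p q ↔ pvF d' p = pvF d' q :=
            (hiff p q hp hq).symm
          have h2 : Relation.EqvGen (pvERel m C) p e.1 ↔ pvF d' p = pvF d' e.1 :=
            (hiff p e.1 hp heK).symm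
          have h3 : Relation.EqvGen (pvERel m C) e.2 q ↔ pvF d' e.2 = pvF d' q :=
            (hiff e.2 q hnbK hq).symm
          have h4 : Relation.EqvGen (pvERel m C) p e.2 ↔ pvF d' p = pvF d' e.2 :=
            (hiff p e.2 hp hnbK).symm
          have h5 : Relation.EqvGen (pvERel m C) e.1 q ↔ pvF d' e.1 = pvF d' q :=
            (hiff e.1 q heK hq).symm
          rw [h1, h2, h3, h4, h5]
          by_cases hpa : pvF d' p = pvF d' e.1 <;> by_cases hqa : pvF d' q = pvF d' e.1
          · rw [if_pos hpa, if_pos hqa]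
            constructor
            · intro _; exact Or.inl (hpa.trans hqa.symm)
            · intro _; rfl
          · rw [if_pos hpa, if_neg hqa]
            constructor
            · intro h; exact Or.inr (Or.inl ⟨hpa, h⟩)
            · rintro (h | ⟨_, h⟩ | ⟨h1, _⟩)
              · exact absurd (h ▸ hpa) hqa
              · exact h
              · exact absurd (hpa.symm.trans h1) hab
          · rw [if_neg hpa, if_pos hqa]
            constructor
            · intro h; exact Or.inr (Or.inr ⟨h, hqa.symm⟩)
            · rintro (h | ⟨h1, _⟩ | ⟨h1, _⟩)
              · exact absurd (h.trans hqa) hpa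
              · exact absurd h1 hpa
              · exact h1
          · rw [if_neg hpa, if_neg hqa]
            constructor
            · exact Or.inl
            · rintro (h | ⟨h1, _⟩ | ⟨_, h2⟩)
              · exact h
              · exact absurd h1 hpa
              · exact absurd h2.symm hqa
    · -- neighbour not a key: nothing happens
      have hred : pvMStep d' e = d' := by
        unfold pvMStep
        rw [if_neg hc]
      rw [hred]
      have hnbK : e.2 ∉ cellList m := by
        rw [← hkeys]
        exact fun h => hc ((PySem.Dict.contains_iff_mem_keys d' e.2).mpr h)
      have hrel : ∀ u v, pvERel m (C ++ [e]) u v ↔ pvERel m C u v := by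
        intro u v
        unfold pvERel
        rw [List.mem_append]
        constructor
        · rintro ⟨h | h, hvK⟩
          · exact ⟨h, hvK⟩
          · rw [List.mem_singleton] at h
            exfalso
            apply hnbK
            rw [← congrArg Prod.snd h]
            exact hvK
        · rintro ⟨h, hvK⟩; exact ⟨Or.inl h, hvK⟩
      refine ⟨hkeys, hFK, ?_⟩
      intro p q hp hq
      rw [hiff p q hp hq]
      constructor
      · exact Relation.EqvGen.mono (fun a b hab => (hrel a b).mpr hab)
      · exact Relation.EqvGen.mono (fun a b hab => (hrel a b).mp hab)
  have hmain := pvFoldInv pvMStep (pvInvM m) (candList m) [] (pvLabel0 m) h0 hstep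
  simpa [pvLabel] using hmain

theorem pvEqvGen_cand_iff_reach (m : List (List Char)) (hrect : pvRect m) (p q : Int × Int)
    (_hp : p ∈ cellList m) :
    Relation.EqvGen (pvERel m (candList m)) p q ↔ pvReach m p q := by
  constructor
  · intro h
    have hmono : ∀ u v, pvERel m (candList m) u v → pvAdj m u v := by
      rintro u v ⟨hmem, hvK⟩
      obtain ⟨huK, hshape⟩ := (mem_candList m (u, v)).mp hmem
      have hucell := (mem_cellList m hrect u).mp huK
      have hvcell := (mem_cellList m hrect v).mp hvK
      refine ⟨hucell, hvcell, ?_⟩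
      rcases hshape with h' | h' <;> (dsimp only at h'; rw [h']; dsimp only; omega)
    exact pvEqvGen_to_reflTransGen (fun a b hab => pvAdj_symm m a b hab)
      (Relation.EqvGen.mono hmono h)
  · intro h
    induction h with
    | refl => exact Relation.EqvGen.refl p
    | @tail b c _ hadj ihh =>
      refine Relation.EqvGen.trans _ _ _ ihh ?_
      have hbK := (mem_cellList m hrect b).mpr hadj.1
      have hcK := (mem_cellList m hrect c).mpr hadj.2.1
      rcases pvAdj_dest m _ _ hadj with h' | h' | h' | h'
      · exact Relation.EqvGen.rel _ _ ⟨(mem_candList m (b, c)).mpr ⟨hbK, Or.inl h'⟩, hcK⟩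
      · have hb' : b = (c.1 + 1, c.2) := by rw [h', Prod.ext_iff]; dsimp only; omega
        exact Relation.EqvGen.symm _ _
          (Relation.EqvGen.rel _ _ ⟨(mem_candList m (c, b)).mpr ⟨hcK, Or.inl hb'⟩, hbK⟩)
      · exact Relation.EqvGen.rel _ _ ⟨(mem_candList m (b, c)).mpr ⟨hbK, Or.inr h'⟩, hcK⟩
      · have hb' : b = (c.1, c.2 + 1) := by rw [h', Prod.ext_iff]; dsimp only; omega
        exact Relation.EqvGen.symm _ _
          (Relation.EqvGen.rel _ _ ⟨(mem_candList m (c, b)).mpr ⟨hcK, Or.inr hb'⟩, hbK⟩)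

-- F of the final label decides connectivity
theorem pvF_iff_reach (m : List (List Char)) (hrect : pvRect m) (p q : Int × Int)
    (hp : p ∈ cellList m) (hq : q ∈ cellList m) :
    pvF (pvLabel m) p = pvF (pvLabel m) q ↔ pvReach m p q := by
  obtain ⟨_, _, hiff⟩ := pvLabel_good m
  exact (hiff p q hp hq).trans (pvEqvGen_cand_iff_reach m hrect p q hp)

-- ---------- grouping fold (B's weights dict) ----------

theorem pvGroupFold_getD {κ : Type} [BEq κ] [LawfulBEq κ] [DecidableEq κ]
    (k : κ → κ) (v : κ → Int) :
    ∀ (l : List κ) (d : PySem.Dict κ Int) (c : κ),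
      (l.foldl (fun w p => w.insert (k p) (w.getD (k p) 0 + v p)) d).getD c 0 =
        d.getD c 0 + ((l.filter (fun p => k p = c)).map v).sum := by
  intro l
  induction l with
  | nil => simp
  | cons x t ih =>
    intro d c
    simp only [List.foldl_cons, List.filter_cons]
    rw [ih]
    by_cases hx : k x = c
    · subst hx; simp; ring
    · have hx' : ¬ c = k x := fun h => hx h.symm
      simp [hx, hx', PySem.Dict.getD_insert]

-- ---------- A: the outer scan ----------

def pvAStep (m : List (List Char)) (st : List Int × PySem.Set (Int × Int)) (p : Int × Int) :
    List Int × PySem.Set (Int × Int) :=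
  if p ∈ st.2 then st
  else (st.1 ++ [pvGw m p], PySem.Set.update st.2 (getGroup m p))

def pvInvA (m : List (List Char)) (C : List (Int × Int))
    (st : List Int × PySem.Set (Int × Int)) : Prop :=
  (∀ q ∈ C, q ∈ cellList m) ∧
  st.2.Nodup ∧
  (∀ q, q ∈ st.2 ↔ q ∈ cellList m ∧ pvF (pvLabel m) q ∈ C.map (pvF (pvLabel m))) ∧
  st.1 = (PySem.Set.ofList (C.map (pvF (pvLabel m)))).map
    (fun c => (((cellList m).filter (fun q => pvF (pvLabel m) q = c)).map (pvWtOf m)).sum)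

set_option maxHeartbeats 2000000 in
theorem pvAScan (m : List (List Char)) (hrect : pvRect m) :
    pvInvA m (cellList m) ((cellList m).foldl (pvAStep m) ([], PySem.Set.empty)) := by
  have h0 : pvInvA m [] ([], PySem.Set.empty) := by
    refine ⟨by simp, List.nodup_nil, ?_, by simp [PySem.Set.ofList_eq_foldl]⟩
    intro q
    constructor
    · intro hq; exact absurd hq (by simp [PySem.Set.empty])
    · rintro ⟨_, h⟩; simp at h
  have hstep : ∀ C p st, p ∈ cellList m → pvInvA m C st →
      pvInvA m (C ++ [p]) (pvAStep m st p) := by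
    intro C p st hp hinv
    obtain ⟨hC, hnd, hmem, hgr⟩ := hinv
    have hC' : ∀ q ∈ C ++ [p], q ∈ cellList m := by
      intro q hq
      rcases List.mem_append.mp hq with h | h
      · exact hC q h
      · rw [List.mem_singleton] at h; exact h ▸ hp
    unfold pvAStep
    by_cases hv : p ∈ st.2
    · rw [if_pos hv]
      have hpF : pvF (pvLabel m) p ∈ C.map (pvF (pvLabel m)) := ((hmem p).mp hv).2
      refine ⟨hC', hnd, ?_, ?_⟩
      · intro q
        rw [hmem q, List.map_append]
        constructor
        · rintro ⟨hqK, hqF⟩; exact ⟨hqK, List.mem_append_left _ hqF⟩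
        · rintro ⟨hqK, hqF⟩
          rcases List.mem_append.mp hqF with h | h
          · exact ⟨hqK, h⟩
          · simp only [List.map_cons, List.map_nil, List.mem_singleton] at h
            exact ⟨hqK, by rw [h]; exact hpF⟩
      · rw [List.map_append]
        simp only [List.map_cons, List.map_nil]
        have hsame : PySem.Set.ofList (C.map (pvF (pvLabel m)) ++ [pvF (pvLabel m) p]) =
            PySem.Set.ofList (C.map (pvF (pvLabel m))) := by
          rw [PySem.Set.ofList_eq_foldl, List.foldl_append]
          simp only [List.foldl_cons, List.foldl_nil]
          rw [← PySem.Set.ofList_eq_foldl]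
          exact pvSet_add_mem _ ((PySem.Set.mem_ofList _ _).mpr hpF)
        rw [hsame]
        exact hgr
    · rw [if_neg hv]
      have hFfresh : pvF (pvLabel m) p ∉ C.map (pvF (pvLabel m)) := by
        intro hmemF
        exact hv ((hmem p).mpr ⟨hp, hmemF⟩)
      have hpcell := (mem_cellList m hrect p).mp hp
      obtain ⟨gnodup, giff⟩ := getGroup_spec m hrect p hpcell
      have gmem : ∀ q, q ∈ getGroup m p ↔
          q ∈ cellList m ∧ pvF (pvLabel m) q = pvF (pvLabel m) p := by
        intro q
        rw [giff q]
        constructor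
        · intro h
          have hqcell := pvReach_cell m p q hpcell h
          have hqK := (mem_cellList m hrect q).mpr hqcell
          exact ⟨hqK, ((pvF_iff_reach m hrect p q hp hqK).mpr h).symm⟩
        · rintro ⟨hqK, hFq⟩
          exact (pvF_iff_reach m hrect p q hp hqK).mp hFq.symm
      refine ⟨hC', pvSet_nodup_update (getGroup m p) st.2 hnd, ?_, ?_⟩
      · intro q
        dsimp only
        rw [PySem.Set.mem_update, hmem q, List.map_append]
        constructor
        · rintro (⟨hqK, hqF⟩ | hqg)
          · exact ⟨hqK, List.mem_append_left _ hqF⟩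
          · obtain ⟨hqK, hFq⟩ := (gmem q).mp hqg
            exact ⟨hqK, List.mem_append_right _ (by simp [hFq])⟩
        · rintro ⟨hqK, hqF⟩
          rcases List.mem_append.mp hqF with h | h
          · exact Or.inl ⟨hqK, h⟩
          · simp only [List.map_cons, List.map_nil, List.mem_singleton] at h
            exact Or.inr ((gmem q).mpr ⟨hqK, h⟩)
      · dsimp only
        rw [List.map_append]
        simp only [List.map_cons, List.map_nil]
        rw [PySem.Set.ofList_eq_foldl, List.foldl_append]
        simp only [List.foldl_cons, List.foldl_nil]
        rw [← PySem.Set.ofList_eq_foldl]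
        rw [pvSet_add_not_mem _ (fun hmm => hFfresh ((PySem.Set.mem_ofList _ _).mp hmm))]
        rw [List.map_append, hgr]
        simp only [List.map_cons, List.map_nil]
        congr 1
        simp only [List.cons.injEq, and_true]
        have hperm : (getGroup m p).Perm
            ((cellList m).filter (fun q => pvF (pvLabel m) q = pvF (pvLabel m) p)) := by
          apply (List.perm_ext_iff_of_nodup gnodup
            (List.Nodup.filter _ (nodup_cellList m))).mpr
          intro q
          rw [List.mem_filter, gmem q]
          simp
        exact (hperm.map (fun q => pvWtOf m q)).sum_eq
  have hmain := pvFoldInv (pvAStep m) (pvInvA m) (cellList m) [] ([], PySem.Set.empty) h0 hstep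
  simpa using hmain

-- ---------- bridging the ports to the canonical folds ----------

def pvAStep' (m : List (List Char)) (st : List Int × PySem.Set (Int × Int))
    (pc : (Int × Int) × Char) : List Int × PySem.Set (Int × Int) :=
  if pc.1 ∈ st.2 then st
  else if pc.2 = '0' then st
  else (st.1 ++ [pvGw m pc.1], PySem.Set.update st.2 (getGroup m pc.1))

set_option maxHeartbeats 2000000 in
theorem buttons_eq (ceiling : String) :
    buttons ceiling = PySem.List.sorted
      (((cellList (pvParse ceiling)).foldl (pvAStep (pvParse ceiling))
        ([], PySem.Set.empty)).1) (fun v => v) true := by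
  have h1 : buttons ceiling = PySem.List.sorted
      (((posPairs (pvParse ceiling)).foldl (pvAStep' (pvParse ceiling))
        ([], PySem.Set.empty)).1) (fun v => v) true := by
    rw [posPairs, List.foldl_flatMap]
    simp only [List.foldl_map]
    rfl
  rw [h1]
  have h3 := pvFoldlSkip (fun pc => decide (pc.2 ≠ '0')) (pvAStep' (pvParse ceiling))
    (posPairs (pvParse ceiling)) ([], PySem.Set.empty) ?hskip
  case hskip =>
    intro s pc _ hpc
    have hz : pc.2 = '0' := by simpa using hpc
    unfold pvAStep'
    by_cases hmm : pc.1 ∈ s.2 <;> simp [hmm, hz]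
  rw [h3]
  have h4 : ((posPairs (pvParse ceiling)).filter (fun pc => decide (pc.2 ≠ '0'))).foldl
      (pvAStep' (pvParse ceiling)) ([], PySem.Set.empty) =
      (cellList (pvParse ceiling)).foldl (pvAStep (pvParse ceiling))
        ([], PySem.Set.empty) := by
    rw [cellList, List.foldl_map]
    apply PySem.List.foldl_congr_mem
    intro acc pc hpc
    have hnz : pc.2 ≠ '0' := by simpa using (List.mem_filter.mp hpc).2
    unfold pvAStep' pvAStep
    by_cases hmm : pc.1 ∈ acc.2 <;> simp [hmm, hnz]
  rw [h4]

set_option maxHeartbeats 2000000 in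
theorem buttons_alt_eq (ceiling : String) (_hrect : pvRect (pvParse ceiling)) :
    buttons_alt ceiling = PySem.List.sorted
      ((PySem.Set.ofList ((cellList (pvParse ceiling)).map (pvF (pvLabel (pvParse ceiling))))).map
        (fun c => (((cellList (pvParse ceiling)).filter
          (fun q => pvF (pvLabel (pvParse ceiling)) q = c)).map (pvWtOf (pvParse ceiling))).sum))
      (fun v => v) true := by
  have h1 : buttons_alt ceiling = PySem.List.sorted ((pvLabel (pvParse ceiling)).items.foldl
      (fun w kv => w.insert kv.2 (w.getD kv.2 0 + pvDigit (pvAt (pvParse ceiling) kv.1.1 kv.1.2)))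
      PySem.Dict.empty).values (fun v => v) true := by
    rw [pvLabel, candList, List.foldl_flatMap, ← pvLabel0_keys]
    rfl
  rw [h1]
  have hkeysL : (pvLabel (pvParse ceiling)).keys = cellList (pvParse ceiling) :=
    (pvLabel_good (pvParse ceiling)).1
  have hndL : (pvLabel (pvParse ceiling)).keys.Nodup := by
    rw [hkeysL]; exact nodup_cellList (pvParse ceiling)
  have hitems : (pvLabel (pvParse ceiling)).items = (cellList (pvParse ceiling)).map
      (fun p => (p, pvF (pvLabel (pvParse ceiling)) p)) := by
    rw [PySem.Dict.items_eq_map_keys (pvLabel (pvParse ceiling)) hndL (((0 : Int), (0 : Int))),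
      hkeysL]
    apply List.map_congr_left
    intro k hk
    have hgd : (pvLabel (pvParse ceiling)).getD k (((0 : Int), (0 : Int))) =
        pvF (pvLabel (pvParse ceiling)) k :=
      pvGetD_irrel (pvLabel (pvParse ceiling)) k (by rw [hkeysL]; exact hk) _ _
    rw [hgd]
  rw [hitems, List.foldl_map]
  have hfeq : (fun (w : PySem.Dict (Int × Int) Int) (p : Int × Int) =>
      w.insert (pvF (pvLabel (pvParse ceiling)) p)
        (w.getD (pvF (pvLabel (pvParse ceiling)) p) 0 +
          pvDigit (pvAt (pvParse ceiling) p.1 p.2))) =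
      (fun (w : PySem.Dict (Int × Int) Int) (p : Int × Int) =>
      w.insert (pvF (pvLabel (pvParse ceiling)) p)
        (w.getD (pvF (pvLabel (pvParse ceiling)) p) 0 + pvWtOf (pvParse ceiling) p)) := rfl
  rw [hfeq]
  have hwkeys : ((cellList (pvParse ceiling)).foldl
      (fun w p => w.insert (pvF (pvLabel (pvParse ceiling)) p)
        (w.getD (pvF (pvLabel (pvParse ceiling)) p) 0 + pvWtOf (pvParse ceiling) p))
      PySem.Dict.empty).keys =
      PySem.Set.ofList ((cellList (pvParse ceiling)).map (pvF (pvLabel (pvParse ceiling)))) := by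
    rw [PySem.Dict.keys_foldl_insert_key (cellList (pvParse ceiling))
      (pvF (pvLabel (pvParse ceiling)))
      (fun w p => w.getD (pvF (pvLabel (pvParse ceiling)) p) 0 + pvWtOf (pvParse ceiling) p)
      PySem.Dict.empty]
    rw [PySem.Dict.keys_empty, PySem.Set.ofList_eq_foldl]
    rfl
  have hwnd : ((cellList (pvParse ceiling)).foldl
      (fun w p => w.insert (pvF (pvLabel (pvParse ceiling)) p)
        (w.getD (pvF (pvLabel (pvParse ceiling)) p) 0 + pvWtOf (pvParse ceiling) p))
      PySem.Dict.empty).keys.Nodup :=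
    PySem.Dict.nodup_keys_foldl_insert_key _ _ _ _ (by rw [PySem.Dict.keys_empty]; exact List.nodup_nil)
  rw [PySem.Dict.values_eq_map_keys _ hwnd 0, hwkeys]
  congr 1
  apply List.map_congr_left
  intro c _
  have hg := pvGroupFold_getD (pvF (pvLabel (pvParse ceiling))) (pvWtOf (pvParse ceiling))
    (cellList (pvParse ceiling)) PySem.Dict.empty c
  rw [hg, PySem.Dict.getD_empty, zero_add]

-- ===== VERDICT (by name: the statement is the Claim_ definition above) =====
theorem buttons_spec : Claim_equal_buttons := by
  intro ceiling _hdom hpre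
  unfold Spec_buttons
  have hrect : pvRect (pvParse ceiling) := by
    intro r hr
    unfold Pre_buttons at hpre
    rw [List.all_eq_true] at hpre
    have hr2 := hpre r hr
    rw [Bool.and_eq_true, beq_iff_eq] at hr2
    rw [pvW_def]
    exact hr2.2
  rw [buttons_eq ceiling, buttons_alt_eq ceiling hrect]
  obtain ⟨_, _, _, hgroups⟩ := pvAScan (pvParse ceiling) hrect
  rw [hgroups]
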